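-- pv_equiv track=rewrite | github.com/EarnAnurat/PythonAsgmt1_Anurat2488941 | AnuratWongbunmak_trees_abbreviation.py | allabbr
-- ===== SOURCE A (Python) =====
-- def allabbr(wl):
--     """Create a set of all the possible abbreviation
--     Ex. ["ANURAT", "WONGBUNMAK", "DUNDEE"] >>> {"ANU","ANR","AWD","ADD",...}
--     wl : words list that we get from words(name)"""
--
--     # Create a string by appending a words from words list, then getting len()
--     lgth = 0;
--     str = "";
--
--     for x in wl:
--         str += x;                               # "ANURATWONGBUNMAKDUNDEE"
--
--     lgth = len(str);
--
--     # Create a set of all the possible abbreviation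
--     setabbr = {str[:3]}                         # start with a set of first 3 letters Ex."ANU"
--     for x in range(1):                          # first letter of the name
--         for y in range(x+1,lgth-1):             # secode letter which is not first and last character in str
--             for z in range(y+1,lgth):           # third letter which come from the rest of character that come after y
--                 setabbr.add(str[x]+str[y]+str[z]);
--     return setabbr;
-- ===== SOURCE B (Python) =====
-- def allabbr(wl):
--     # One pass over distinct-suffix tables instead of the quadratic double loop:
--     # for each first occurrence of a middle letter, pair it with the distinct
--     # letters that follow it (precomputed right-to-left), O(n*alphabet) total.
--     s = "".join(wl)
--     res = {s[:3]}
--     first = s[:1]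
--     tail = s[1:]
--     # rests[i] = distinct chars of tail[i+1:], in first-occurrence order
--     rests = []
--     cur = []
--     for c in reversed(tail):
--         rests.append(cur)
--         cur = [c] + [d for d in cur if d != c]
--     rests.reverse()
--     seen = set()
--     for c, rest in zip(tail, rests):
--         if c not in seen:
--             seen.add(c)
--             for d in rest:
--                 res.add(first + c + d)
--     return res
-- ===== Notes on version B (the rewrite author's own statement) =====
-- stated objective: faster
-- what changed: Replaces A's quadratic double loop over all index pairs (y,z) by a single pass that pairs each first occurrence of a middle letter with a precomputed table of the distinct letters following it, so repeated letters and repeated pairs are never revisited.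
import Mathlib
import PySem

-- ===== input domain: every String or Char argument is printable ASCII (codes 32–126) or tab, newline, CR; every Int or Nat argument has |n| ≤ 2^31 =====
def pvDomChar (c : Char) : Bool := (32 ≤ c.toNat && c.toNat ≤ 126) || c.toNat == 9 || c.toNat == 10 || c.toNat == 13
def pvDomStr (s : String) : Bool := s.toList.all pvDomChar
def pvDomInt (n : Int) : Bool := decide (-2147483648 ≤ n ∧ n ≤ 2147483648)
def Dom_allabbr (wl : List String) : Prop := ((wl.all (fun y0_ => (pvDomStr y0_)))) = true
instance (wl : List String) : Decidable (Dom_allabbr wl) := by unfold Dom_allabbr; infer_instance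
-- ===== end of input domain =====

-- B replaces A's quadratic double index loop by a single pass pairing each first
-- occurrence of a middle letter with the precomputed distinct letters following it.

-- ===== PORT A =====
-- Python strings are ported as List Char throughout (exact; String.ofList at the end).
def allabbr (wl : List String) : List String :=
  -- str = ""; for x in wl: str += x
  let str : List Char := wl.foldl (fun acc x => acc ++ x.toList) []
  let lgth : Int := PySem.List.len str
  -- setabbr = {str[:3]}
  let setabbr : PySem.Set String := PySem.Set.ofList [String.ofList (PySem.List.slice str none (some 3))]
  -- for x in range(1): for y in range(x+1, lgth-1): for z in range(y+1, lgth): setabbr.add(str[x]+str[y]+str[z])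
  (PySem.List.pyRange 0 1 1).foldl (fun S x =>
    (PySem.List.pyRange (x + 1) (lgth - 1) 1).foldl (fun S y =>
      (PySem.List.pyRange (y + 1) lgth 1).foldl (fun S z =>
        PySem.Set.add S (String.ofList
          [PySem.List.pyGetD str x ' ', PySem.List.pyGetD str y ' ', PySem.List.pyGetD str z ' '])) S) S) setabbr

-- ===== PORT B =====
def allabbr_alt (wl : List String) : List String :=
  -- s = "".join(wl)
  let s : List Char := (wl.map String.toList).flatten
  -- res = {s[:3]}
  let res : PySem.Set String := PySem.Set.ofList [String.ofList (PySem.List.slice s none (some 3))]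
  let first : List Char := PySem.List.slice s none (some 1)        -- s[:1]
  let tail : List Char := PySem.List.slice s (some 1) none         -- s[1:]
  -- for c in reversed(tail): rests.append(cur); cur = [c] + [d for d in cur if d != c]
  let built : List (List Char) × List Char :=
    tail.reverse.foldl (fun p c => (p.1 ++ [p.2], c :: p.2.filter (fun d => d != c))) ([], [])
  let rests : List (List Char) := built.1.reverse
  -- for c, rest in zip(tail, rests): if c not in seen: seen.add(c); for d in rest: res.add(first+c+d)
  let out : PySem.Set String × PySem.Set Char :=
    (tail.zip rests).foldl (fun st cr =>
      if PySem.Set.contains st.2 cr.1 then st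
      else ((cr.2.foldl (fun T d => PySem.Set.add T (String.ofList (first ++ [cr.1, d]))) st.1),
            PySem.Set.add st.2 cr.1))
      (res, PySem.Set.empty)
  out.1

-- ===== PRECONDITION & SPEC =====
def Spec_allabbr (wl : List String) (out : List String) : Prop := out = allabbr_alt wl
instance (wl : List String) (out : List String) : Decidable (Spec_allabbr wl out) := by unfold Spec_allabbr; infer_instance

-- ===== CLAIM (what is proved, stated in full; the proofs are below) =====
def Claim_equal_allabbr : Prop := ∀ (wl : List String), Dom_allabbr wl → Spec_allabbr wl (allabbr wl)

-- ===== LEMMAS AND PROOFS =====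

-- canonical form of A's double loop over the suffix of middle letters
def goA (tri : Char → Char → String) : PySem.Set String → List Char → PySem.Set String
  | S, [] => S
  | S, a :: rest => goA tri (rest.foldl (fun T b => PySem.Set.add T (tri a b)) S) rest

-- canonical form of B's single pass
def goB (tri : Char → Char → String) :
    PySem.Set String → PySem.Set Char → List Char → PySem.Set String
  | S, _, [] => S
  | S, seen, a :: rest =>
    if PySem.Set.contains seen a then goB tri S seen rest
    else goB tri ((curOf rest).foldl (fun T b => PySem.Set.add T (tri a b)) S)
      (PySem.Set.add seen a) rest
where
  curOf : List Char → List Char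
    | [] => []
    | a :: rest => a :: (curOf rest).filter (fun d => d != a)

def tailsCur : List Char → List (List Char)
  | [] => []
  | _ :: rest => goB.curOf rest :: tailsCur rest

lemma flatten_foldl (wl : List String) :
    ∀ acc : List Char, wl.foldl (fun acc x => acc ++ x.toList) acc = acc ++ (wl.map String.toList).flatten := by
  induction wl with
  | nil => simp
  | cons w wl ih => intro acc; simp [List.foldl, ih]

lemma addG_mem_mono (g : Char → String) :
    ∀ (m : List Char) (S : PySem.Set String) (x : String), x ∈ S →
      x ∈ m.foldl (fun T b => PySem.Set.add T (g b)) S := by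
  intro m
  induction m with
  | nil => intro S x h; simpa using h
  | cons b m ih =>
    intro S x h
    exact ih _ _ ((PySem.Set.mem_add S (g b) x).2 (Or.inl h))

lemma addG_mem_image (g : Char → String) :
    ∀ (m : List Char) (S : PySem.Set String) (b : Char), b ∈ m →
      g b ∈ m.foldl (fun T b => PySem.Set.add T (g b)) S := by
  intro m
  induction m with
  | nil => intro S b h; simp at h
  | cons c m ih =>
    intro S b h
    rcases List.mem_cons.1 h with h | h
    · subst h
      exact addG_mem_mono g m _ _ ((PySem.Set.mem_add S (g b) (g b)).2 (Or.inr rfl))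
    · exact ih _ _ h

lemma addG_absorb (g : Char → String) :
    ∀ (m : List Char) (S : PySem.Set String), (∀ b ∈ m, g b ∈ S) →
      m.foldl (fun T b => PySem.Set.add T (g b)) S = S := by
  intro m
  induction m with
  | nil => intro S _; rfl
  | cons b m ih =>
    intro S h
    have hb : PySem.Set.add S (g b) = S := PySem.Set.add_of_mem (h b (List.mem_cons_self ..))
    simp only [List.foldl, hb]
    exact ih S (fun c hc => h c (List.mem_cons_of_mem _ hc))

lemma addG_filter (g : Char → String) (x : Char) :
    ∀ (m : List Char) (S : PySem.Set String), g x ∈ S →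
      (m.filter (fun d => d != x)).foldl (fun T b => PySem.Set.add T (g b)) S
        = m.foldl (fun T b => PySem.Set.add T (g b)) S := by
  intro m
  induction m with
  | nil => intro S _; rfl
  | cons b m ih =>
    intro S h
    by_cases hb : b = x
    · subst hb
      simp only [List.filter, bne_self_eq_false, List.foldl, PySem.Set.add_of_mem h]
      exact ih S h
    · have : (b != x) = true := bne_iff_ne.2 hb
      simp only [List.filter, this, List.foldl]
      exact ih _ ((PySem.Set.mem_add S (g b) (g x)).2 (Or.inl h))

lemma addG_curOf (g : Char → String) :
    ∀ (m : List Char) (S : PySem.Set String),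
      (goB.curOf m).foldl (fun T b => PySem.Set.add T (g b)) S
        = m.foldl (fun T b => PySem.Set.add T (g b)) S := by
  intro m
  induction m with
  | nil => intro S; rfl
  | cons b m ih =>
    intro S
    simp only [goB.curOf, List.foldl]
    rw [addG_filter g b _ _ ((PySem.Set.mem_add S (g b) (g b)).2 (Or.inr rfl)), ih]

-- A's pass equals B's pass given the invariant "everything a seen letter can form is in S"
lemma goA_eq_goB (tri : Char → Char → String) :
    ∀ (l : List Char) (S : PySem.Set String) (seen : PySem.Set Char),
      (∀ a ∈ seen, ∀ b ∈ l, tri a b ∈ S) → goA tri S l = goB tri S seen l := by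
  intro l
  induction l with
  | nil => intro S seen _; rfl
  | cons a rest ih =>
    intro S seen hinv
    simp only [goA, goB]
    by_cases hc : PySem.Set.contains seen a
    · have ha : a ∈ seen := List.mem_of_elem_eq_true hc
      rw [if_pos hc]
      rw [addG_absorb _ _ _ (fun b hb => hinv a ha b (List.mem_cons_of_mem _ hb))]
      exact ih S seen (fun a' ha' b hb => hinv a' ha' b (List.mem_cons_of_mem _ hb))
    · rw [if_neg hc, addG_curOf]
      apply ih
      intro a' ha' b hb
      rcases (PySem.Set.mem_add seen a a').1 ha' with h | h
      · exact addG_mem_mono _ _ _ _ (hinv a' h b (List.mem_cons_of_mem _ hb))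
      · subst h; exact addG_mem_image _ _ _ _ hb

-- bridge: A's index double loop is goA on the suffix
lemma A_bridge (cs : List Char) (d : Char) (tri : Char → Char → String) :
    ∀ (l : List Char) (k : Nat) (S : PySem.Set String), cs.drop k = l →
      (PySem.List.pyRange (k : Int) ((cs.length : Int) - 1) 1).foldl (fun S y =>
        (PySem.List.pyRange (y + 1) (cs.length : Int) 1).foldl (fun S z =>
          PySem.Set.add S (tri (PySem.List.pyGetD cs y d) (PySem.List.pyGetD cs z d))) S) S
      = goA tri S l := by
  intro l
  induction l with
  | nil =>
    intro k S h
    have hk : cs.length ≤ k := by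
      have := List.length_drop (l := cs) (i := k)
      rw [h] at this
      simp at this; omega
    rw [PySem.List.pyRange_one_eq_nil (by omega : (cs.length : Int) - 1 ≤ (k : Int))]
    rfl
  | cons a rest ih =>
    intro k S h
    have hk : k < cs.length := by
      have := List.length_drop (l := cs) (i := k)
      rw [h] at this
      simp at this; omega
    have hget : PySem.List.pyGetD cs (k : Int) d = a := by
      rw [PySem.List.pyGetD_natCast]
      have h0 : cs[k]? = some a := by
        have := List.getElem?_drop (xs := cs) (i := k) (j := 0)
        rw [h] at this; simpa using this.symm
      simp [List.getD, h0]
    have hdrop : cs.drop (k + 1) = rest := by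
      have : List.drop 1 (cs.drop k) = cs.drop (k + 1) := by
        rw [List.drop_drop]
      rw [h] at this; simpa using this.symm
    by_cases hlast : k + 1 = cs.length
    · -- a is the last character: both passes add nothing
      have hrest : rest = [] := by
        rw [← hdrop, hlast, List.drop_length]
      rw [PySem.List.pyRange_one_eq_nil (by omega : (cs.length : Int) - 1 ≤ (k : Int))]
      subst hrest
      simp [goA]
    · have hlt : (k : Int) < (cs.length : Int) - 1 := by omega
      rw [PySem.List.pyRange_one_cons hlt]
      simp only [List.foldl]
      rw [hget]
      have hinner :
          (PySem.List.pyRange ((k : Int) + 1) ((cs.length : Int)) 1).foldl (fun S z =>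
            PySem.Set.add S (tri a (PySem.List.pyGetD cs z d))) S
          = rest.foldl (fun T b => PySem.Set.add T (tri a b)) S := by
        have := PySem.List.foldl_pyRange_pyGetD' cs d
          (fun T b => PySem.Set.add T (tri a b)) S (a := (k : Int) + 1) (by omega)
        rw [this]
        have : ((k : Int) + 1).toNat = k + 1 := by omega
        rw [this, hdrop]
      rw [hinner]
      have hrec := ih (k + 1) (rest.foldl (fun T b => PySem.Set.add T (tri a b)) S) hdrop
      push_cast at hrec
      rw [show goA tri S (a :: rest)
            = goA tri (rest.foldl (fun T b => PySem.Set.add T (tri a b)) S) rest from rfl]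
      exact hrec

-- bridge: B's reversed fold builds exactly the distinct-suffix tables
lemma B_build (l : List Char) :
    l.reverse.foldl (fun p c => (p.1 ++ [p.2], c :: p.2.filter (fun d => d != c)))
      (([], []) : List (List Char) × List Char)
    = ((tailsCur l).reverse, goB.curOf l) := by
  induction l with
  | nil => rfl
  | cons a rest ih =>
    simp only [List.reverse_cons, List.foldl_append, ih, List.foldl_cons, List.foldl_nil]
    simp [tailsCur, goB.curOf]

-- bridge: B's zip fold is goB
lemma B_bridge (first : List Char) :
    ∀ (l : List Char) (S : PySem.Set String) (seen : PySem.Set Char),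
      ((l.zip (tailsCur l)).foldl (fun st cr =>
        if PySem.Set.contains st.2 cr.1 then st
        else ((cr.2.foldl (fun T d => PySem.Set.add T (String.ofList (first ++ [cr.1, d]))) st.1),
              PySem.Set.add st.2 cr.1)) (S, seen)).1
      = goB (fun a b => String.ofList (first ++ [a, b])) S seen l := by
  intro l
  induction l with
  | nil => intro S seen; rfl
  | cons a rest ih =>
    intro S seen
    simp only [tailsCur, List.zip_cons_cons, List.foldl_cons, goB]
    by_cases hc : PySem.Set.contains seen a
    · rw [if_pos hc, if_pos hc]
      exact ih S seen
    · rw [if_neg hc, if_neg hc]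
      exact ih _ _

-- the post-concatenation computations of the two ports coincide
lemma core (cs : List Char) :
    (PySem.List.pyRange 1 ((cs.length : Int) - 1) 1).foldl (fun S y =>
      (PySem.List.pyRange (y + 1) (cs.length : Int) 1).foldl (fun S z =>
        PySem.Set.add S (String.ofList
          [PySem.List.pyGetD cs 0 ' ', PySem.List.pyGetD cs y ' ', PySem.List.pyGetD cs z ' '])) S)
      (PySem.Set.ofList [String.ofList (PySem.List.slice cs none (some 3))])
    = (let first := PySem.List.slice cs none (some 1)
       let tail := PySem.List.slice cs (some 1) none
       let built := tail.reverse.foldl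
         (fun p c => (p.1 ++ [p.2], c :: p.2.filter (fun d => d != c))) (([], []) : List (List Char) × List Char)
       ((tail.zip built.1.reverse).foldl (fun st cr =>
          if PySem.Set.contains st.2 cr.1 then st
          else ((cr.2.foldl (fun T d => PySem.Set.add T (String.ofList (first ++ [cr.1, d]))) st.1),
                PySem.Set.add st.2 cr.1))
         (PySem.Set.ofList [String.ofList (PySem.List.slice cs none (some 3))], PySem.Set.empty)).1) := by
  have hA := A_bridge cs ' '
    (fun a b => String.ofList [PySem.List.pyGetD cs 0 ' ', a, b]) cs.tail 1
    (PySem.Set.ofList [String.ofList (PySem.List.slice cs none (some 3))])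
    (by simp)
  simp only [Nat.cast_one] at hA
  rw [hA]
  simp only [PySem.List.slice_from_one]
  rw [B_build cs.tail, List.reverse_reverse, B_bridge]
  cases hc : cs with
  | nil => rfl
  | cons c cs' =>
    rw [show (fun a b => String.ofList [PySem.List.pyGetD (c :: cs') 0 ' ', a, b])
          = (fun a b => String.ofList (PySem.List.slice (c :: cs') none (some 1) ++ [a, b])) from
        funext fun a => funext fun b => by simp [pysem]]
    apply goA_eq_goB
    intro a ha
    simp [PySem.Set.empty] at ha

theorem allabbr_eq (wl : List String) : allabbr wl = allabbr_alt wl := by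
  unfold allabbr allabbr_alt
  rw [flatten_foldl wl []]
  simp only [List.nil_append, PySem.List.len_eq]
  have h01 : PySem.List.pyRange 0 1 1 = [0] := by
    simpa using PySem.List.pyRange_one_singleton 0
  rw [h01]
  simp only [List.foldl_cons, List.foldl_nil, zero_add]
  exact core ((wl.map String.toList).flatten)

-- ===== VERDICT (by name: the statement is the Claim_ definition above) =====
theorem allabbr_spec : Claim_equal_allabbr := by
  intro wl _
  unfold Spec_allabbr
  exact allabbr_eq wl
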